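-- pv_equiv track=rewrite | github.com/baphaelman/experimenting | unique_cut.py | finalFunc
-- ===== SOURCE A (Python) =====
-- def finalFunc(red, blue, pieces):
--     """Given the number of blue and red marks and pieces cut, returns whether each non-end piece contains a red or blue mark"""
--     redPieces = red + 1
--     bluePieces = blue + 1
--
--     if pieces - 2 < redPieces and pieces < bluePieces: # if there are fewer total pieces than red and blue pieces, clearly each will have at least one
--         return True
--     if pieces - 2 > red + blue:
--         return False
--
--     subFactor = lcm(redPieces, bluePieces)
--     sumRed = lcm(pieces, bluePieces) # what to add succesively when testing for reds
--     sumBlue = lcm(pieces, redPieces) # what to add succesively when testing for blues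
--
--     tracker = sumRed
--     countTracker = 1
--     counts = []
--     for _ in range(red): # testing for reds
--         while (tracker >= subFactor):
--             tracker -= subFactor
--             countTracker += 1
--         counts.append(countTracker)
--         tracker += sumRed
--
--     tracker = sumBlue
--     countTracker = 1
--     for _ in range(blue): # testing for blues (i know, repeating code, ew)
--         while (tracker >= subFactor):
--             tracker -= subFactor
--             countTracker += 1
--         counts.append(countTracker)
--         tracker += sumBlue
--
--     # return whether counts has all the numbers from 2 to pieces - 1 (this excludes the end pieces)
--     for i in range(2, pieces - 1):
--         if i not in counts:
--             return False
--     return True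
--
-- def lcm(a, b):
--     """Returns the least common multiple of two numbers"""
--     return a * b // gcd(a, b)
--
-- def gcd(a, b):
--     """Returns the greatest common divisor of two numbers"""
--     while b:
--         a, b = b, a % b
--     return a
-- ===== SOURCE B (Python) =====
-- def gcd(a, b):
--     while b:
--         a, b = b, a % b
--     return a
--
-- def lcm(a, b):
--     return a * b // gcd(a, b)
--
-- def finalFunc(red, blue, pieces):
--     """Per-piece closed-form test: piece k holds a mark iff an integer interval is non-empty."""
--     redPieces = red + 1
--     bluePieces = blue + 1
--     if pieces - 2 < redPieces and pieces < bluePieces: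
--         return True
--     if pieces - 2 > red + blue:
--         return False
--     sub = lcm(redPieces, bluePieces)
--     sumRed = lcm(pieces, bluePieces)
--     sumBlue = lcm(pieces, redPieces)
--     for k in range(2, pieces - 1):
--         # red mark i lands in piece k iff (k-1)*sub <= i*sumRed <= k*sub - 1
--         loR = max(1, -(-((k - 1) * sub) // sumRed))
--         hiR = min(red, (k * sub - 1) // sumRed)
--         if loR <= hiR:
--             continue
--         loB = max(1, -(-((k - 1) * sub) // sumBlue))
--         hiB = min(blue, (k * sub - 1) // sumBlue)
--         if loB <= hiB:
--             continue
--         return False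
--     return True
-- ===== Notes on version B (the rewrite author's own statement) =====
-- stated objective: alternative
-- what changed: B drops A's mark-placement loops (cumulative-subtraction 'while' per mark) and the counts list with its per-piece linear membership scan, and instead tests each middle piece directly with a closed-form integer-interval non-emptiness check (ceil/floor division), so the red/blue marking loops and the inner scan disappear; much cheaper on main-path inputs, but random large inputs mostly exit via the unchanged guards, so no overall speed is claimed.
-- outside the precondition, e.g. on finalFunc(-1, 0, 1): A returns True, B returns True; on finalFunc(-6, 1, -3): A returns True, B returns True
import Mathlib
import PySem

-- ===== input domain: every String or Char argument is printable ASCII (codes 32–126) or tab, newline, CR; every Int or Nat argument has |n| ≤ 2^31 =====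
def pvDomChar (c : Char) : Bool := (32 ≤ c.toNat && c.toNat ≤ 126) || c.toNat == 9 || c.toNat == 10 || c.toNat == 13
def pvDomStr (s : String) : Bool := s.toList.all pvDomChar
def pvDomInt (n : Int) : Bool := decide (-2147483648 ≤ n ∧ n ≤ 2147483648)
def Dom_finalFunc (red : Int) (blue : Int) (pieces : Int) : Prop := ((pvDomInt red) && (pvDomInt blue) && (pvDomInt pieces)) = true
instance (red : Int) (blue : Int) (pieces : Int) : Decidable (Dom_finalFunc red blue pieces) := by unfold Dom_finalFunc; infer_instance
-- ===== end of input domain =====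

-- B replaces A's mark-placement loops and counts-list membership scans by a per-piece
-- closed-form interval-emptiness test (a different algorithm of comparable cost overall).

-- ===== PORT A =====
-- termination lemma for the hand-written Euclidean gcd (Python 'while b: a, b = b, a % b')
theorem pyModNatAbsLt (a b : Int) (h : b ≠ 0) : (PySem.Int.mod a b).natAbs < b.natAbs := by
  rcases lt_or_gt_of_ne h with hb | hb
  · have e : PySem.Int.mod a b = - PySem.Int.mod (-a) (-b) := by
      have := PySem.Int.mod_neg_neg (-a) (-b)
      simpa using this.symm
    have hb' : (0:Int) < -b := by omega
    rw [e, Int.natAbs_neg, PySem.Int.mod_eq_emod_of_pos hb']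
    have h1 := Int.emod_nonneg (-a) (by omega : (-b) ≠ 0)
    have h2 := Int.emod_lt_of_pos (-a) hb'
    omega
  · rw [PySem.Int.mod_eq_emod_of_pos hb]
    have h1 := Int.emod_nonneg a (by omega : b ≠ 0)
    have h2 := Int.emod_lt_of_pos a hb
    omega

-- Python helper gcd(a, b)
def pyGcd (a b : Int) : Int :=
  if h : b = 0 then a else pyGcd b (PySem.Int.mod a b)
termination_by b.natAbs
decreasing_by exact pyModNatAbsLt a b h

-- Python helper lcm(a, b) = a * b // gcd(a, b)
def pyLcm (a b : Int) : Int := PySem.Int.floordiv (a * b) (pyGcd a b)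

-- inner 'while tracker >= subFactor: tracker -= subFactor; countTracker += 1'
-- (fuel only makes the loop total in Lean; with 0 < sub it is never exhausted)
def reduceW : Nat → Int → Int → Int → Int × Int
  | 0, tracker, count, _ => (tracker, count)
  | (f+1), tracker, count, sub =>
      if sub ≤ tracker then reduceW f (tracker - sub) (count + 1) sub else (tracker, count)

-- one 'for _ in range(n)' marking loop of A, state (tracker, countTracker, counts)
def markLoop (n sumV sub : Int) (cs0 : List Int) : Int × Int × List Int :=
  (PySem.List.pyRange 0 n 1).foldl
    (fun st _ =>
      let r := reduceW (st.1.toNat + 1) st.1 st.2.1 sub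
      (r.1 + sumV, r.2, st.2.2 ++ [r.2]))
    (sumV, 1, cs0)

def finalFunc (red : Int) (blue : Int) (pieces : Int) : Bool :=
  let redPieces := red + 1
  let bluePieces := blue + 1
  if pieces - 2 < redPieces ∧ pieces < bluePieces then true
  else if pieces - 2 > red + blue then false
  else
    let subFactor := pyLcm redPieces bluePieces
    let sumRed := pyLcm pieces bluePieces
    let sumBlue := pyLcm pieces redPieces
    let counts := (markLoop blue sumBlue subFactor (markLoop red sumRed subFactor []).2.2).2.2
    (PySem.List.pyRange 2 (pieces - 1) 1).all (fun i => counts.contains i)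

-- ===== PORT B =====
def finalFunc_alt (red : Int) (blue : Int) (pieces : Int) : Bool :=
  let redPieces := red + 1
  let bluePieces := blue + 1
  if pieces - 2 < redPieces ∧ pieces < bluePieces then true
  else if pieces - 2 > red + blue then false
  else
    let sub := pyLcm redPieces bluePieces
    let sumRed := pyLcm pieces bluePieces
    let sumBlue := pyLcm pieces redPieces
    (PySem.List.pyRange 2 (pieces - 1) 1).all (fun k =>
      decide (max 1 (-(PySem.Int.floordiv (-((k - 1) * sub)) sumRed)) ≤
        min red (PySem.Int.floordiv (k * sub - 1) sumRed)) ||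
      decide (max 1 (-(PySem.Int.floordiv (-((k - 1) * sub)) sumBlue)) ≤
        min blue (PySem.Int.floordiv (k * sub - 1) sumBlue)))

-- ===== PRECONDITION & SPEC =====
-- Pre_ restricts to the natural domain of nonnegative mark counts, plus the inputs the two
-- early guards answer outright: outside it (negative red/blue reaching the main path) A
-- raises ZeroDivisionError or loops forever except on a few degenerate inputs where it
-- happens to return True.
def Pre_finalFunc (red : Int) (blue : Int) (pieces : Int) : Prop :=
  (0 ≤ red ∧ 0 ≤ blue) ∨ (pieces - 2 < red + 1 ∧ pieces < blue + 1) ∨ (pieces - 2 > red + blue)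
instance (red : Int) (blue : Int) (pieces : Int) : Decidable (Pre_finalFunc red blue pieces) := by
  unfold Pre_finalFunc; infer_instance

def pvWitness_finalFunc : Int × Int × Int := (2, 1, 5)

def Spec_finalFunc (red : Int) (blue : Int) (pieces : Int) (out : Bool) : Prop := out = finalFunc_alt red blue pieces
instance (red : Int) (blue : Int) (pieces : Int) (out : Bool) : Decidable (Spec_finalFunc red blue pieces out) := by unfold Spec_finalFunc; infer_instance

-- ===== CLAIM (what is proved, stated in full; the proofs are below) =====
def Claim_equal_finalFunc : Prop := ∀ (red : Int) (blue : Int) (pieces : Int), Dom_finalFunc red blue pieces → Pre_finalFunc red blue pieces → Spec_finalFunc red blue pieces (finalFunc red blue pieces)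

-- ===== LEMMAS AND PROOFS =====

-- gcd of nonnegative, not-both-zero ints is a positive common divisor
theorem pyGcd_spec : ∀ (m : Nat) (a b : Int), b.natAbs = m → 0 ≤ a → 0 ≤ b → (0 < a ∨ 0 < b) →
    0 < pyGcd a b ∧ pyGcd a b ∣ a ∧ pyGcd a b ∣ b := by
  intro m
  induction m using Nat.strong_induction_on with
  | _ m ih =>
    intro a b hm ha hb hpos
    by_cases h : b = 0
    · rw [pyGcd, dif_pos h]
      subst h
      exact ⟨by omega, dvd_refl a, dvd_zero a⟩
    · have hb' : 0 < b := lt_of_le_of_ne hb (Ne.symm h)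
      have hmod : PySem.Int.mod a b = a % b := PySem.Int.mod_eq_emod_of_pos hb'
      rw [pyGcd, dif_neg h, hmod]
      have h1 := Int.emod_nonneg a h
      have h2 := Int.emod_lt_of_pos a hb'
      have hlt : (a % b).natAbs < m := by omega
      obtain ⟨hg, hd1, hd2⟩ := ih _ hlt b (a % b) rfl hb h1 (Or.inl hb')
      refine ⟨hg, ?_, hd1⟩
      have hsum : pyGcd b (a % b) ∣ a % b + b * (a / b) := dvd_add hd2 (hd1.mul_right _)
      rwa [Int.emod_add_ediv] at hsum

-- lcm of two positive ints is positive
theorem pyLcm_pos (a b : Int) (ha : 0 < a) (hb : 0 < b) : 0 < pyLcm a b := by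
  obtain ⟨hg, hda, _⟩ := pyGcd_spec b.natAbs a b rfl (le_of_lt ha) (le_of_lt hb) (Or.inl ha)
  unfold pyLcm
  have h1 : pyGcd a b ≤ a := Int.le_of_dvd ha hda
  have h2 : (1:Int) ≤ PySem.Int.floordiv (a * b) (pyGcd a b) :=
    (PySem.Int.le_floordiv_iff_mul_le hg).mpr (by nlinarith)
  omega

-- the inner while loop computes mod and cumulative quotient
theorem reduceW_spec (f : Nat) : ∀ (tracker count sub : Int), 0 < sub → 0 ≤ tracker →
    tracker.natAbs < f →
    reduceW f tracker count sub = (tracker % sub, count + tracker / sub) := by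
  induction f with
  | zero => intro t c s _ _ h; omega
  | succ f ih =>
    intro t c s hs ht hf
    rw [reduceW]
    by_cases h : s ≤ t
    · rw [if_pos h, ih (t - s) (c + 1) s hs (by omega) (by omega)]
      have e1 : (t - s) % s = t % s := Int.sub_emod_right t s
      have e2 : (t - s) / s = t / s - 1 := by
        rw [show t - s = t + -1 * s by ring, Int.add_mul_ediv_right t (-1) (by omega : s ≠ 0)]
        ring
      rw [e1, e2]; ring_nf
    · rw [if_neg h, Int.emod_eq_of_lt ht (by omega), Int.ediv_eq_zero_of_lt ht (by omega)]
      simp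

-- the marking loop produces exactly the pieces 1 + (j*sumV)//sub for j = 1..n
theorem markLoop_spec : ∀ (m : Nat) (sumV sub : Int) (cs0 : List Int), 0 < sub → 0 < sumV →
    markLoop (m : Int) sumV sub cs0 =
      ((m : Int) * sumV % sub + sumV, 1 + (m : Int) * sumV / sub,
        cs0 ++ (PySem.List.pyRange 1 ((m : Int) + 1) 1).map (fun j => 1 + j * sumV / sub)) := by
  intro m
  induction m with
  | zero =>
    intro sumV sub cs0 hs hv
    have h0 : PySem.List.pyRange 0 (0:Int) 1 = [] := PySem.List.pyRange_one_eq_nil le_rfl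
    simp [markLoop, h0]
  | succ m ih =>
    intro sumV sub cs0 hs hv
    have hrange : PySem.List.pyRange 0 ((m : Int) + 1) 1 = PySem.List.pyRange 0 (m : Int) 1 ++ [(m : Int)] :=
      PySem.List.pyRange_one_succ_right (by exact_mod_cast Int.natCast_nonneg m)
    have hprev := ih sumV sub cs0 hs hv
    unfold markLoop at hprev ⊢
    push_cast
    rw [hrange, List.foldl_append, hprev]
    simp only [List.foldl_cons, List.foldl_nil]
    have hr0 : 0 ≤ (m : Int) * sumV % sub := Int.emod_nonneg _ (by omega)
    have htr : 0 ≤ (m : Int) * sumV % sub + sumV := by omega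
    have hfuelgen : ∀ x : Int, 0 ≤ x → x.natAbs < x.toNat + 1 := fun x hx => by omega
    rw [reduceW_spec _ _ _ _ hs htr (hfuelgen _ htr)]
    have hd := Int.emod_add_ediv ((m : Int) * sumV) sub
    have e1 : ((m : Int) * sumV % sub + sumV) % sub = ((m : Int) + 1) * sumV % sub := by
      rw [Int.emod_add_emod]; ring_nf
    have e2 : 1 + (m : Int) * sumV / sub + ((m : Int) * sumV % sub + sumV) / sub
        = 1 + ((m : Int) + 1) * sumV / sub := by
      have h4 := Int.add_mul_ediv_right ((m : Int) * sumV % sub + sumV) ((m : Int) * sumV / sub) (by omega : sub ≠ 0)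
      rw [show ((m : Int) * sumV % sub + sumV) + ((m : Int) * sumV / sub) * sub
          = ((m : Int) * sumV % sub + sub * ((m : Int) * sumV / sub)) + sumV by ring, hd,
        show (m : Int) * sumV + sumV = ((m : Int) + 1) * sumV by ring] at h4
      omega
    have e3 : PySem.List.pyRange 1 ((m : Int) + 1 + 1) 1
        = PySem.List.pyRange 1 ((m : Int) + 1) 1 ++ [(m : Int) + 1] :=
      PySem.List.pyRange_one_succ_right (by omega)
    rw [e1, e2, e3]
    simp [List.append_assoc]

-- existence of a mark index in piece k ⟺ B's interval test
theorem interval_test (n sumV sub k : Int) (hs : 0 < sub) (hv : 0 < sumV) :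
    (∃ j : Int, 1 ≤ j ∧ j ≤ n ∧ 1 + j * sumV / sub = k) ↔
      max 1 (-(PySem.Int.floordiv (-((k - 1) * sub)) sumV)) ≤
        min n (PySem.Int.floordiv (k * sub - 1) sumV) := by
  set C := -(PySem.Int.floordiv (-((k - 1) * sub)) sumV) with hC
  set F := PySem.Int.floordiv (k * sub - 1) sumV with hF
  have hCb : (C - 1) * sumV < (k - 1) * sub ∧ (k - 1) * sub ≤ C * sumV :=
    (PySem.Int.neg_floordiv_neg_eq_iff_of_pos hv).mp hC.symm
  have hFb : F * sumV ≤ k * sub - 1 ∧ k * sub - 1 < (F + 1) * sumV :=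
    (PySem.Int.floordiv_eq_iff_of_pos hv).mp hF.symm
  have key : ∀ j : Int, (j * sumV / sub = k - 1) ↔ ((k - 1) * sub ≤ j * sumV ∧ j * sumV < k * sub) := by
    intro j
    constructor
    · intro h
      refine ⟨?_, ?_⟩
      · have := (Int.le_ediv_iff_mul_le hs (a := k - 1) (b := j * sumV)).mp (le_of_eq h.symm)
        linarith
      · have := (Int.ediv_lt_iff_lt_mul hs (a := j * sumV) (b := k)).mp (by omega)
        linarith
    · intro h
      have l1 : k - 1 ≤ j * sumV / sub := (Int.le_ediv_iff_mul_le hs).mpr h.1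
      have l2 : j * sumV / sub < k := (Int.ediv_lt_iff_lt_mul hs).mpr h.2
      omega
  constructor
  · rintro ⟨j, hj1, hj2, hj3⟩
    have hjk : j * sumV / sub = k - 1 := by omega
    obtain ⟨h1, h2⟩ := (key j).mp hjk
    have hCj : C - 1 < j :=
      lt_of_mul_lt_mul_right (lt_of_lt_of_le hCb.1 h1) hv.le
    have hjF : j < F + 1 :=
      lt_of_mul_lt_mul_right (lt_of_le_of_lt (by omega : j * sumV ≤ k * sub - 1) hFb.2) hv.le
    omega
  · intro h
    have hjF : max 1 C ≤ F := le_trans h (min_le_right _ _)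
    have h2 : (max 1 C) * sumV ≤ k * sub - 1 :=
      le_trans (mul_le_mul_of_nonneg_right hjF hv.le) hFb.1
    have h1 : (k - 1) * sub ≤ (max 1 C) * sumV := by
      rcases le_total C 1 with hc | hc
      · rw [max_eq_left hc]
        exact le_trans hCb.2 (mul_le_mul_of_nonneg_right hc hv.le)
      · rw [max_eq_right hc]
        exact hCb.2
    have hk := (key (max 1 C)).mpr ⟨h1, by omega⟩
    exact ⟨max 1 C, le_max_left _ _, le_trans h (min_le_left _ _), by omega⟩

-- ===== VERDICT (by name: the statement is the Claim_ definition above) =====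
theorem finalFunc_spec : Claim_equal_finalFunc := by
  intro red blue pieces _ hpre
  unfold Spec_finalFunc finalFunc finalFunc_alt
  by_cases hg1 : pieces - 2 < red + 1 ∧ pieces < blue + 1
  · simp [hg1]
  · by_cases hg2 : pieces - 2 > red + blue
    · simp [hg2]
    · simp only [if_neg hg1, if_neg hg2]
      -- main path: Pre_ forces 0 ≤ red, 0 ≤ blue; ¬guard1 forces 1 ≤ pieces
      have hr : 0 ≤ red ∧ 0 ≤ blue := by
        rcases hpre with h | h | h
        · exact h
        · exact absurd h hg1
        · exact absurd h hg2
      have hp : 1 ≤ pieces := by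
        rcases not_and_or.mp hg1 with h | h <;> omega
      have hsub : 0 < pyLcm (red + 1) (blue + 1) := pyLcm_pos _ _ (by omega) (by omega)
      have hsr : 0 < pyLcm pieces (blue + 1) := pyLcm_pos _ _ (by omega) (by omega)
      have hsb : 0 < pyLcm pieces (red + 1) := pyLcm_pos _ _ (by omega) (by omega)
      set sub := pyLcm (red + 1) (blue + 1) with hsubdef
      set sumR := pyLcm pieces (blue + 1) with hsrdef
      set sumB := pyLcm pieces (red + 1) with hsbdef
      obtain ⟨mr, hmr⟩ := Int.eq_ofNat_of_zero_le hr.1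
      obtain ⟨mb, hmb⟩ := Int.eq_ofNat_of_zero_le hr.2
      have hmark1 := markLoop_spec mr sumR sub [] hsub hsr
      have hmark2 := markLoop_spec mb sumB sub
        ((PySem.List.pyRange 1 ((mr : Int) + 1) 1).map (fun j => 1 + j * sumR / sub)) hsub hsb
      rw [hmr, hmb, hmark1]
      simp only [List.nil_append] at hmark2 ⊢
      rw [hmark2]
      refine List.all_congr rfl ?_
      intro k
      apply Bool.eq_iff_iff.mpr
      have memIff : ∀ (n : Int) (f : Int → Int),
          (k ∈ (PySem.List.pyRange 1 (n + 1) 1).map f) ↔ (∃ j : Int, 1 ≤ j ∧ j ≤ n ∧ f j = k) := by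
        intro n f
        simp only [List.mem_map, PySem.List.mem_pyRange_one]
        constructor
        · rintro ⟨j, ⟨u1, u2⟩, u3⟩
          exact ⟨j, u1, by omega, u3⟩
        · rintro ⟨j, u1, u2, u3⟩
          exact ⟨j, ⟨u1, by omega⟩, u3⟩
      simp only [List.contains_eq_mem, List.mem_append, decide_eq_true_eq, Bool.or_eq_true]
      exact or_congr ((memIff _ _).trans (interval_test (mr : Int) sumR sub k hsub hsr))
        ((memIff _ _).trans (interval_test (mb : Int) sumB sub k hsub hsb))
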